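-- pv_equiv track=rewrite | github.com/vaishnavipawar09/Applied-Algorithms | Assignment 8/Assignment8_AA_VP.py | translate_message
-- ===== SOURCE A (Python) =====
-- def translate_message(arr):
--     hashtable = set(arr)
--     maxseqlen = 0
--
--     for seqstart in arr:
--         seqlength = 0
--         currentelement = seqstart
--
--         while currentelement in hashtable:
--             seqlength += 1
--             currentelement += 7
--         maxseqlen = max(maxseqlen, seqlength)
--
--     return maxseqlen
-- ===== SOURCE B (Python) =====
-- def translate_message(arr):
--     values = set(arr)
--     best = 0
--     for start in arr:
--         if start - 7 in values:
--             continue  # not a chain start; its chain is a suffix of the chain from the true start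
--         length = 0
--         cur = start
--         while cur in values:
--             length += 1
--             cur += 7
--         if length > best:
--             best = length
--     return best
-- ===== Notes on version B (the rewrite author's own statement) =====
-- stated objective: alternative
-- what changed: B walks the +7 chain only from chain starts (values x with x-7 not in the set) and skips all other elements, instead of re-walking the chain from every element as A does.
import Mathlib
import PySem

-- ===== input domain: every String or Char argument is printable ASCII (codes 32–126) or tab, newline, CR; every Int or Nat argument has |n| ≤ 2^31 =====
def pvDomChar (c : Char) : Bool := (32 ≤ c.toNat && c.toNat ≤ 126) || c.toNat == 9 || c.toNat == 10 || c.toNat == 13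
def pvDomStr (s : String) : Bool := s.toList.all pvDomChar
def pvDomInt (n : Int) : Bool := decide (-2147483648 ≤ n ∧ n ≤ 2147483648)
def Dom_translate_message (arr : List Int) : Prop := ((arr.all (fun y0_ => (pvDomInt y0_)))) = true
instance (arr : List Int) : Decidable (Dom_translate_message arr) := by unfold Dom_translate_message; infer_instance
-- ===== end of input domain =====

-- B walks the +7 chain only from chain starts (x-7 not in the set); A walks it from every element.

-- ===== PORT A =====
-- A's while loop: counts steps while `currentelement ∈ hashtable`. Fuel `arr.length + 1`
-- strictly exceeds any possible chain length (≤ number of distinct elements), so it never cuts the loop short.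
def pvAWhile (hashtable : List Int) : Int → Nat → Int
  | _, 0 => 0
  | currentelement, f+1 =>
    if currentelement ∈ hashtable then 1 + pvAWhile hashtable (currentelement + 7) f else 0

def translate_message (arr : List Int) : Int :=
  let hashtable : PySem.Set Int := PySem.Set.ofList arr
  arr.foldl (fun maxseqlen seqstart =>
    max maxseqlen (pvAWhile hashtable seqstart (arr.length + 1))) 0

-- ===== PORT B =====
-- B's while loop, with the running `length` accumulator; same fuel bound as A's.
def pvBWalk (values : List Int) : Nat → Int → Int → Int
  | 0, _, length => length
  | f+1, cur, length =>
    if cur ∈ values then pvBWalk values f (cur + 7) (length + 1) else length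

def translate_message_alt (arr : List Int) : Int :=
  let values : PySem.Set Int := PySem.Set.ofList arr
  arr.foldl (fun best start =>
    if start - 7 ∈ values then best
    else
      let length := pvBWalk values (arr.length + 1) start 0
      if length > best then length else best) 0

-- ===== PRECONDITION & SPEC =====
def Spec_translate_message (arr : List Int) (out : Int) : Prop := out = translate_message_alt arr
instance (arr : List Int) (out : Int) : Decidable (Spec_translate_message arr out) := by unfold Spec_translate_message; infer_instance

-- ===== CLAIM (what is proved, stated in full; the proofs are below) =====
def Claim_equal_translate_message : Prop := ∀ (arr : List Int), Dom_translate_message arr → Spec_translate_message arr (translate_message arr)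

-- ===== LEMMAS AND PROOFS =====

-- Pigeonhole: the arithmetic progression x, x+c, x+2c, … (c ≠ 0) cannot stay inside the finite list s.
lemma pvStopExists (s : List Int) (x c : Int) (hc : c ≠ 0) :
    ∃ i : Nat, i ≤ s.length ∧ x + c * (i : Int) ∉ s := by
  by_contra h
  push_neg at h
  have hsub : (Finset.range (s.length + 1)).image (fun i : Nat => x + c * (i : Int)) ⊆ s.toFinset := by
    intro y hy
    simp only [Finset.mem_image, Finset.mem_range] at hy
    obtain ⟨i, hi, rfl⟩ := hy
    simpa using h i (by omega)
  have hinj : Set.InjOn (fun i : Nat => x + c * (i : Int)) (Finset.range (s.length + 1)) := by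
    intro a _ b _ hab
    simp only at hab
    have : c * (a : Int) = c * b := by omega
    have := mul_left_cancel₀ hc this
    exact_mod_cast this
  have hcard := Finset.card_le_card hsub
  rw [Finset.card_image_of_injOn hinj, Finset.card_range] at hcard
  have := s.toFinset_card_le
  omega

lemma pvKex (s : List Int) (x : Int) : ∃ i : Nat, x + 7 * (i : Int) ∉ s := by
  obtain ⟨i, _, h⟩ := pvStopExists s x 7 (by norm_num)
  exact ⟨i, h⟩

-- the true chain length from x: least i with x + 7*i ∉ s
def pvK (s : List Int) (x : Int) : Nat := Nat.find (pvKex s x)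

lemma pvK_le (s : List Int) (x : Int) : pvK s x ≤ s.length := by
  obtain ⟨i, hi, h⟩ := pvStopExists s x 7 (by norm_num)
  exact le_trans (Nat.find_min' _ h) hi

lemma pvK_zero_iff (s : List Int) (x : Int) : pvK s x = 0 ↔ x ∉ s := by
  unfold pvK
  rw [Nat.find_eq_zero]
  norm_num

lemma pvK_succ (s : List Int) (x : Int) (hx : x ∈ s) : pvK s x = pvK s (x + 7) + 1 := by
  have h1 : pvK s x ≤ pvK s (x + 7) + 1 := by
    apply Nat.find_min'
    have hns : x + 7 + 7 * ((pvK s (x + 7) : Nat) : Int) ∉ s := Nat.find_spec (pvKex s (x + 7))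
    push_cast
    intro hmem; apply hns
    have he : x + 7 + 7 * ((pvK s (x + 7) : Nat) : Int) = x + 7 * (((pvK s (x + 7) : Nat) : Int) + 1) := by ring
    rw [he]; exact hmem
  have h0 : pvK s x ≠ 0 := fun h => ((pvK_zero_iff s x).mp h) hx
  have h2 : pvK s (x + 7) ≤ pvK s x - 1 := by
    apply Nat.find_min'
    have hs := Nat.find_spec (pvKex s x)
    have : x + 7 * ((pvK s x : Nat) : Int) ∉ s := hs
    intro hmem; apply this
    have hcast : ((pvK s x - 1 : Nat) : Int) = (pvK s x : Nat) - 1 := by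
      have : 1 ≤ pvK s x := Nat.one_le_iff_ne_zero.mpr h0
      push_cast [this]; ring
    have : x + 7 + 7 * ((pvK s x - 1 : Nat) : Int) = x + 7 * (pvK s x : Nat) := by
      rw [hcast]; ring
    rwa [this] at hmem
  omega

lemma pvAWhile_eq (s : List Int) (f : Nat) : ∀ x : Int, pvAWhile s x f = ((min f (pvK s x) : Nat) : Int) := by
  induction f with
  | zero => intro x; simp [pvAWhile]
  | succ f ih =>
    intro x
    by_cases hx : x ∈ s
    · have hk := pvK_succ s x hx
      simp only [pvAWhile, if_pos hx, ih (x + 7), hk]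
      push_cast
      omega
    · have hk : pvK s x = 0 := (pvK_zero_iff s x).mpr hx
      simp [pvAWhile, hx, hk]

lemma pvBWalk_eq (s : List Int) (f : Nat) : ∀ (x a : Int), pvBWalk s f x a = a + ((min f (pvK s x) : Nat) : Int) := by
  induction f with
  | zero => intro x a; simp [pvBWalk]
  | succ f ih =>
    intro x a
    by_cases hx : x ∈ s
    · have hk := pvK_succ s x hx
      simp only [pvBWalk, if_pos hx, ih (x + 7), hk]
      push_cast
      omega
    · have hk : pvK s x = 0 := (pvK_zero_iff s x).mpr hx
      simp [pvBWalk, hx, hk]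

-- walking j steps backwards through members of s adds j to the chain length
lemma pvBack (s : List Int) (x : Int) (j : Nat) (h : ∀ i : Nat, i < j → x - 7 * ((i : Int) + 1) ∈ s) :
    pvK s (x - 7 * (j : Int)) = pvK s x + j := by
  induction j with
  | zero => simp
  | succ j ih =>
    have hmem : x - 7 * ((j : Int) + 1) ∈ s := h j (by omega)
    have hstep := pvK_succ s (x - 7 * ((j : Int) + 1)) hmem
    have harg : x - 7 * ((j : Int) + 1) + 7 = x - 7 * (j : Int) := by ring
    rw [harg] at hstep
    have hj := ih (fun i hi => h i (by omega))
    have hcast : ((j + 1 : Nat) : Int) = (j : Int) + 1 := by push_cast; ring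
    rw [hcast, hstep, hj]
    omega

-- every element's chain is dominated by some chain start's chain
lemma pvStart (arr : List Int) (x : Int) (hx : x ∈ arr) :
    ∃ y ∈ arr, y - 7 ∉ PySem.Set.ofList arr ∧
      pvK (PySem.Set.ofList arr) x ≤ pvK (PySem.Set.ofList arr) y := by
  set s := PySem.Set.ofList arr with hs
  obtain ⟨j, _, hj⟩ := pvStopExists s (x - 7) (-7) (by norm_num)
  -- choose the least such j
  have hex : ∃ j : Nat, (x - 7) + (-7) * (j : Int) ∉ s := ⟨j, hj⟩
  set j0 := Nat.find hex with hj0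
  refine ⟨x - 7 * (j0 : Int), ?_, ?_, ?_⟩
  · -- membership in arr
    rcases Nat.eq_zero_or_pos j0 with h0 | hpos
    · simpa [h0] using hx
    · have hmin := Nat.find_min hex (show j0 - 1 < j0 by omega)
      push_neg at hmin
      have hcast : ((j0 - 1 : Nat) : Int) = (j0 : Int) - 1 := by
        push_cast [Nat.one_le_iff_ne_zero.mpr (by omega : j0 ≠ 0)]; ring
      have : x - 7 + -7 * ((j0 : Int) - 1) = x - 7 * (j0 : Int) := by ring
      rw [hcast, this] at hmin
      rw [hs] at hmin
      exact (PySem.Set.mem_ofList arr _).mp hmin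
  · -- it is a chain start
    have hsp := Nat.find_spec hex
    have : x - 7 + -7 * (j0 : Int) = x - 7 * (j0 : Int) - 7 := by ring
    rwa [this] at hsp
  · -- its chain is at least as long
    have hall : ∀ i : Nat, i < j0 → x - 7 * ((i : Int) + 1) ∈ s := by
      intro i hi
      have := Nat.find_min hex hi
      push_neg at this
      have harg : x - 7 + -7 * (i : Int) = x - 7 * ((i : Int) + 1) := by ring
      rwa [harg] at this
    rw [pvBack s x j0 hall]
    omega

-- generic fold facts for the two loop bodies
lemma pvFoldBinit (s : List Int) (c : Int → Int) (l : List Int) :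
    ∀ m : Int, m ≤ l.foldl (fun b y => if y - 7 ∈ s then b else max b (c y)) m := by
  induction l with
  | nil => intro m; simp
  | cons hd tl ih =>
    intro m
    simp only [List.foldl_cons]
    refine le_trans ?_ (ih _)
    by_cases hc : hd - 7 ∈ s <;> simp [hc]

lemma pvFoldBmem (s : List Int) (c : Int → Int) (l : List Int) (y : Int)
    (hy : y ∈ l) (hstart : y - 7 ∉ s) :
    ∀ m : Int, c y ≤ l.foldl (fun b x => if x - 7 ∈ s then b else max b (c x)) m := by
  induction l with
  | nil => cases hy
  | cons hd tl ih =>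
    intro m
    simp only [List.foldl_cons]
    rcases List.mem_cons.mp hy with rfl | hmem
    · refine le_trans ?_ (pvFoldBinit s c tl _)
      simp [hstart]
    · exact ih hmem _

lemma pvFoldAle (c : Int → Int) (l : List Int) (M : Int)
    (hc : ∀ y ∈ l, c y ≤ M) :
    ∀ m : Int, m ≤ M → l.foldl (fun b y => max b (c y)) m ≤ M := by
  induction l with
  | nil => intro m hm; simpa using hm
  | cons hd tl ih =>
    intro m hm
    simp only [List.foldl_cons]
    exact ih (fun y hy => hc y (List.mem_cons_of_mem _ hy)) _
      (by have := hc hd (List.mem_cons_self); omega)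

lemma pvFoldBleA (s : List Int) (c : Int → Int) (l : List Int) :
    ∀ m m' : Int, m ≤ m' →
      l.foldl (fun b y => if y - 7 ∈ s then b else max b (c y)) m ≤
      l.foldl (fun b y => max b (c y)) m' := by
  induction l with
  | nil => intro m m' h; simpa using h
  | cons hd tl ih =>
    intro m m' h
    simp only [List.foldl_cons]
    apply ih
    by_cases hc : hd - 7 ∈ s <;> simp [hc] <;> omega

-- the two ports in terms of pvK
lemma pvAeq (arr : List Int) :
    translate_message arr =
      arr.foldl (fun b y => max b ((pvK (PySem.Set.ofList arr) y : Nat) : Int)) 0 := by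
  unfold translate_message
  simp only
  congr 1
  funext b y
  rw [pvAWhile_eq]
  congr 1
  have h1 := pvK_le (PySem.Set.ofList arr) y
  have h2 := PySem.Set.length_ofList_le (xs := arr)
  omega

lemma pvBeq (arr : List Int) :
    translate_message_alt arr =
      arr.foldl (fun b y => if y - 7 ∈ PySem.Set.ofList arr then b
        else max b ((pvK (PySem.Set.ofList arr) y : Nat) : Int)) 0 := by
  unfold translate_message_alt
  simp only
  congr 1
  funext b y
  rw [pvBWalk_eq]
  have h1 := pvK_le (PySem.Set.ofList arr) y
  have h2 := PySem.Set.length_ofList_le (xs := arr)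
  have hmin : min (arr.length + 1) (pvK (PySem.Set.ofList arr) y) = pvK (PySem.Set.ofList arr) y := by omega
  rw [hmin]
  by_cases hc : y - 7 ∈ PySem.Set.ofList arr
  · simp [hc]
  · simp only [if_neg hc, zero_add]
    split <;> omega

-- ===== VERDICT (by name: the statement is the Claim_ definition above) =====
theorem translate_message_spec : Claim_equal_translate_message := by
  intro arr _
  unfold Spec_translate_message
  rw [pvAeq, pvBeq]
  set s := PySem.Set.ofList arr with hs
  set c : Int → Int := fun y => ((pvK s y : Nat) : Int) with hcdef
  apply le_antisymm
  · -- A ≤ B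
    apply pvFoldAle c arr _ ?_ 0 (pvFoldBinit s c arr 0)
    intro y hy
    obtain ⟨z, hz, hzstart, hle⟩ := pvStart arr y hy
    refine le_trans ?_ (pvFoldBmem s c arr z hz hzstart 0)
    simp only [hcdef]
    exact_mod_cast hle
  · -- B ≤ A
    exact pvFoldBleA s c arr 0 0 le_rfl
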